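-- pv_equiv track=rewrite | github.com/brunospcastro/IA-Tetris | student.py | holes
-- ===== SOURCE A (Python) =====
-- def highest(lista):
--     if lista == []:
--         return None
--     lista.sort(key=lambda x: x[1])
--     return lista[0][1]
--
-- def holes(game):
--     nholes = 0
--     high = highest(game)
--     if high != None:
--         for i in range(1,9):
--             for j in range(29, high-1, -1): #high better then high-1?
--                 if [i,j] not in game:
--                     nholes += 1
--     return nholes
-- ===== SOURCE B (Python) =====
-- def holes(game):
--     # Same return value as the original; also sorts `game` in place by x[1] like the original.
--     if not game:
--         return 0
--     game.sort(key=lambda x: x[1])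
--     high = game[0][1]
--     filled = {(r[0], r[1]) for r in game
--               if len(r) == 2 and 1 <= r[0] <= 8 and high <= r[1] <= 29}
--     return max(0, 8 * (30 - high)) - len(filled)
-- ===== Notes on version B (the rewrite author's own statement) =====
-- stated objective: faster
-- what changed: Replaces the exhaustive cell-by-cell scan of the 8x(30-high) region (with an O(n) list-membership test per cell) by region-size arithmetic minus the size of a set of distinct filled (i,j) cells built in one pass over the board.
import Mathlib
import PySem

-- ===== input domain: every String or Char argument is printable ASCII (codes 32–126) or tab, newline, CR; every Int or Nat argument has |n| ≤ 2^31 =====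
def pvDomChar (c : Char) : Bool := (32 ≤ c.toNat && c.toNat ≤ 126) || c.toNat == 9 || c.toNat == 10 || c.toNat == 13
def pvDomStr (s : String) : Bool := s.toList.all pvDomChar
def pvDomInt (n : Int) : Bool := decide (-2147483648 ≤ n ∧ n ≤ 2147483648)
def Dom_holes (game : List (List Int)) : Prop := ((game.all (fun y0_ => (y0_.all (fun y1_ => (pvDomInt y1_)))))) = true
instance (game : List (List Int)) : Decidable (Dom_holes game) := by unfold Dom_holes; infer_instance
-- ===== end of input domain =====

-- B replaces A's exhaustive cell-by-cell scan of the region by region-size arithmetic minus the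
-- size of a set of distinct filled cells (faster); equivalence is about the RETURN value — B's
-- Python performs the same in-place sort of `game` as A.


-- ===== PORT A =====
-- key of `lista.sort(key=lambda x: x[1])`; x[1] raises IndexError on rows shorter than 2
-- (those inputs are excluded by Pre_holes), so the .getD 0 default is never reached there.
def pvKey (x : List Int) : Int := (PySem.List.pyGet? x 1).getD 0

-- helper `highest(lista)`
def pvHighest (lista : List (List Int)) : Option Int :=
  if lista = [] then none
  else
    let s := PySem.List.sorted lista pvKey false
    some ((PySem.List.pyGet? ((PySem.List.pyGet? s 0).getD []) 1).getD 0)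

def holes (game : List (List Int)) : Int :=
  match pvHighest game with
  | none => 0
  | some high =>
      (PySem.List.pyRange 1 9 1).foldl (fun nholes i =>
        (PySem.List.pyRange 29 (high - 1) (-1)).foldl (fun nholes j =>
          if [i, j] ∈ game then nholes else nholes + 1) nholes) 0

-- ===== PORT B =====
def holes_alt (game : List (List Int)) : Int :=
  if game = [] then 0
  else
    let s := PySem.List.sorted game pvKey false
    let high := (PySem.List.pyGet? ((PySem.List.pyGet? s 0).getD []) 1).getD 0
    let filled : PySem.Set (Int × Int) :=
      PySem.Set.ofList ((game.filter (fun r => r.length == 2 &&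
          decide (1 ≤ (PySem.List.pyGet? r 0).getD 0 ∧ (PySem.List.pyGet? r 0).getD 0 ≤ 8 ∧
            high ≤ (PySem.List.pyGet? r 1).getD 0 ∧ (PySem.List.pyGet? r 1).getD 0 ≤ 29))).map
        (fun r => ((PySem.List.pyGet? r 0).getD 0, (PySem.List.pyGet? r 1).getD 0)))
    max 0 (8 * (30 - high)) - PySem.Set.len filled

-- ===== PRECONDITION & SPEC =====
-- A's sort key x[1] (and lista[0][1]) raises IndexError on any row of length < 2,
-- so Pre_ admits exactly the inputs where every row has at least two entries.
def Pre_holes (game : List (List Int)) : Prop := ∀ r ∈ game, 2 ≤ r.length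
instance (game : List (List Int)) : Decidable (Pre_holes game) := by unfold Pre_holes; infer_instance

def pvWitness_holes : List (List Int) := [[3, 27], [5, 28], [3, 27, 1]]

def Spec_holes (game : List (List Int)) (out : Int) : Prop := out = holes_alt game
instance (game : List (List Int)) (out : Int) : Decidable (Spec_holes game out) := by unfold Spec_holes; infer_instance

-- ===== CLAIM (what is proved, stated in full; the proofs are below) =====
def Claim_equal_holes : Prop := ∀ (game : List (List Int)), Dom_holes game → Pre_holes game → Spec_holes game (holes game)

-- ===== LEMMAS AND PROOFS =====

-- the list of distinct filled cells B builds, as a function of game and high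
def pvFilled (game : List (List Int)) (high : Int) : List (Int × Int) :=
  PySem.Set.ofList ((game.filter (fun r => r.length == 2 &&
      decide (1 ≤ (PySem.List.pyGet? r 0).getD 0 ∧ (PySem.List.pyGet? r 0).getD 0 ≤ 8 ∧
        high ≤ (PySem.List.pyGet? r 1).getD 0 ∧ (PySem.List.pyGet? r 1).getD 0 ≤ 29))).map
    (fun r => ((PySem.List.pyGet? r 0).getD 0, (PySem.List.pyGet? r 1).getD 0)))

lemma mem_pvFilled (game : List (List Int)) (high : Int) (p : Int × Int) :
    p ∈ pvFilled game high ↔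
      [p.1, p.2] ∈ game ∧ 1 ≤ p.1 ∧ p.1 ≤ 8 ∧ high ≤ p.2 ∧ p.2 ≤ 29 := by
  unfold pvFilled
  rw [PySem.Set.mem_ofList]
  simp only [List.mem_map, List.mem_filter, Bool.and_eq_true, beq_iff_eq, decide_eq_true_eq]
  constructor
  · rintro ⟨r, ⟨hr, hlen, hb⟩, rfl⟩
    match r, hlen with
    | [a, b], _ =>
      simp only [PySem.List.pyGet?, PySem.List.pyIdx?] at hb ⊢
      simpa using ⟨hr, hb⟩
  · rintro ⟨hmem, h1, h2, h3, h4⟩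
    refine ⟨[p.1, p.2], ⟨hmem, rfl, ?_⟩, ?_⟩ <;>
      simp [PySem.List.pyGet?, PySem.List.pyIdx?, h1, h2, h3, h4]

-- the filled cells A's scan finds, listed per column
def pvScan (game : List (List Int)) (high : Int) : List (Int × Int) :=
  (PySem.List.pyRange 1 9 1).flatMap (fun i =>
    ((PySem.List.pyRange 29 (high - 1) (-1)).filter (fun j => decide ([i, j] ∈ game))).map
      (fun j => (i, j)))

lemma mem_pvScan (game : List (List Int)) (high : Int) (p : Int × Int) :
    p ∈ pvScan game high ↔
      [p.1, p.2] ∈ game ∧ 1 ≤ p.1 ∧ p.1 ≤ 8 ∧ high ≤ p.2 ∧ p.2 ≤ 29 := by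
  unfold pvScan
  simp only [List.mem_flatMap, List.mem_map, List.mem_filter, decide_eq_true_eq,
    PySem.List.mem_pyRange_one, PySem.List.mem_pyRange_neg_one]
  constructor
  · rintro ⟨i, hi, j, ⟨⟨hj1, hj2⟩, hm⟩, rfl⟩
    exact ⟨hm, hi.1, by omega, by omega, hj2⟩
  · rintro ⟨hm, h1, h2, h3, h4⟩
    exact ⟨p.1, ⟨h1, by omega⟩, p.2, ⟨⟨by omega, h4⟩, hm⟩, rfl⟩

lemma nodup_pvScan (game : List (List Int)) (high : Int) : (pvScan game high).Nodup := by
  unfold pvScan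
  rw [List.nodup_flatMap]
  constructor
  · intro i _
    have hJ : (PySem.List.pyRange 29 (high - 1) (-1)).Nodup := by
      rw [PySem.List.pyRange_neg_one_eq_reverse, List.nodup_reverse]
      exact PySem.List.nodup_pyRange_one _ _
    exact (hJ.filter _).map (fun a b h => by simpa using congrArg Prod.snd h)
  · refine List.Pairwise.imp ?_ (PySem.List.nodup_pyRange_one 1 9)
    intro a b hab
    rw [Function.onFun, List.disjoint_left]
    rintro p hp hq
    simp only [List.mem_map, List.mem_filter] at hp hq
    obtain ⟨j, _, rfl⟩ := hp
    obtain ⟨j', _, h⟩ := hq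
    exact hab (by simpa using congrArg Prod.fst h.symm)

lemma length_scan_eq_filled (game : List (List Int)) (high : Int) :
    (pvScan game high).length = (pvFilled game high).length := by
  refine (((List.perm_ext_iff_of_nodup (nodup_pvScan game high) ?_).2 ?_)).length_eq
  · exact PySem.Set.nodup_ofList _
  · intro p
    rw [mem_pvScan, mem_pvFilled]

-- cast of a Nat-valued mapped sum
lemma pv_cast_sum (l : List Int) (f : Int → Nat) :
    (((l.map f).sum : Nat) : Int) = (l.map (fun x => ((f x : Nat) : Int))).sum := by
  induction l with
  | nil => simp
  | cons x t ih => simp only [List.map_cons, List.sum_cons]; push_cast [ih]; ring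

-- sum of a list mapped through (c - g ·)
lemma pv_sum_sub (I : List Int) (c : Int) (f g : Int → Int) (h : ∀ i ∈ I, f i = c - g i) :
    (I.map f).sum = I.length * c - (I.map g).sum := by
  induction I with
  | nil => simp
  | cons x t ih =>
    simp only [List.map_cons, List.sum_cons, List.length_cons, h x (by simp)]
    rw [ih (fun i hi => h i (by simp [hi]))]
    push_cast
    ring

-- A's double loop counts region size minus the number of distinct filled cells in the region
lemma scan_count (game : List (List Int)) (high : Int) :
    (PySem.List.pyRange 1 9 1).foldl (fun nholes i =>
        (PySem.List.pyRange 29 (high - 1) (-1)).foldl (fun nholes j =>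
          if [i, j] ∈ game then nholes else nholes + 1) nholes) 0
    = max 0 (8 * (30 - high)) - ((pvScan game high).length : Int) := by
  have hinner : ∀ (i : Int) (n : Int),
      (PySem.List.pyRange 29 (high - 1) (-1)).foldl (fun nholes j =>
        if [i, j] ∈ game then nholes else nholes + 1) n
      = n + (((PySem.List.pyRange 29 (high - 1) (-1)).countP
          (fun j => decide ([i, j] ∉ game)) : Int)) := by
    intro i n
    rw [← PySem.List.foldl_ite_add_one (p := fun j => [i, j] ∉ game)
      (l := PySem.List.pyRange 29 (high - 1) (-1)) (a := n)]
    apply PySem.List.foldl_congr_mem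
    intro acc x _
    by_cases hx : [i, x] ∈ game <;> simp [hx]
  rw [PySem.List.foldl_congr_mem (PySem.List.pyRange 1 9 1) _
      (fun nholes i => nholes + (((PySem.List.pyRange 29 (high - 1) (-1)).countP
        (fun j => decide ([i, j] ∉ game)) : Int))) 0
      (fun acc x _ => hinner x acc)]
  rw [PySem.List.foldl_add]
  have hlenJ : (PySem.List.pyRange 29 (high - 1) (-1)).length = (30 - high).toNat := by
    rw [PySem.List.length_pyRange_neg_one]; congr 1; omega
  have hcnt : ∀ i : Int, i ∈ PySem.List.pyRange 1 9 1 →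
      (fun i => (((PySem.List.pyRange 29 (high - 1) (-1)).countP
          (fun j => decide ([i, j] ∉ game)) : Int))) i
      = (((30 - high).toNat : Int)) - (fun i =>
          (((PySem.List.pyRange 29 (high - 1) (-1)).countP
            (fun j => decide ([i, j] ∈ game)) : Int))) i := by
    intro i _
    simp only
    have h1 := List.length_eq_length_filter_add (l := PySem.List.pyRange 29 (high - 1) (-1))
      (fun j => decide ([i, j] ∈ game))
    rw [hlenJ] at h1
    rw [List.countP_eq_length_filter, List.countP_eq_length_filter]
    have h2 : (PySem.List.pyRange 29 (high - 1) (-1)).filter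
        (fun j => !decide ([i, j] ∈ game))
        = (PySem.List.pyRange 29 (high - 1) (-1)).filter (fun j => decide ([i, j] ∉ game)) := by
      apply List.filter_congr
      intro x _
      by_cases hx : [i, x] ∈ game <;> simp [hx]
    rw [← h2]
    omega
  rw [pv_sum_sub _ _ _ _ hcnt]
  have hscan : ((pvScan game high).length : Int)
      = ((PySem.List.pyRange 1 9 1).map (fun i =>
          (((PySem.List.pyRange 29 (high - 1) (-1)).countP
            (fun j => decide ([i, j] ∈ game)) : Int)))).sum := by
    unfold pvScan
    rw [List.length_flatMap]
    have h3 : ∀ i : Int, ((((PySem.List.pyRange 29 (high - 1) (-1)).filter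
          (fun j => decide ([i, j] ∈ game))).map (fun j => (i, j))).length : Nat)
        = (PySem.List.pyRange 29 (high - 1) (-1)).countP (fun j => decide ([i, j] ∈ game)) := by
      intro i
      simp [List.countP_eq_length_filter]
    rw [List.map_congr_left (fun i _ => h3 i)]
    rw [pv_cast_sum]
  rw [← hscan]
  have hIlen : (PySem.List.pyRange 1 9 1).length = 8 := by decide
  rw [hIlen]
  omega

-- ===== VERDICT (by name: the statement is the Claim_ definition above) =====
theorem holes_spec : Claim_equal_holes := by
  intro game _ _
  unfold Spec_holes holes holes_alt pvHighest
  by_cases hg : game = []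
  · simp [hg]
  · simp only [hg, if_false]
    rw [scan_count]
    rw [length_scan_eq_filled]
    simp [PySem.Set.len, pvFilled]
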